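-- pv_equiv track=rewrite | github.com/olivesgatech/FunML | tools/add_figure_numbers.py | _build_comment_mask
-- ===== SOURCE A (Python) =====
-- def _build_comment_mask(tex: str) -> list:
--     """Return bool list: True where the character is inside a LaTeX comment."""
--     mask = [False] * len(tex)
--     in_comment = False
--     i = 0
--     while i < len(tex):
--         c = tex[i]
--         if c == "\n":
--             in_comment = False
--             mask[i] = False
--             i += 1
--         elif c == "\\" and not in_comment:
--             # Escaped character — mark both chars as not-comment, skip next.
--             mask[i] = False
--             i += 1
--             if i < len(tex):
--                 mask[i] = False
--                 i += 1
--         elif c == "%" and not in_comment: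
--             in_comment = True
--             mask[i] = True
--             i += 1
--         else:
--             mask[i] = in_comment
--             i += 1
--     return mask
-- ===== SOURCE B (Python) =====
-- def _build_comment_mask(tex: str) -> list:
--     """Return bool list: True where the character is inside a LaTeX comment."""
--     out = []
--     for line in tex.split("\n"):
--         esc = False
--         idx = None
--         for j, c in enumerate(line):
--             if esc:
--                 esc = False
--             elif c == "\\":
--                 esc = True
--             elif c == "%":
--                 idx = j
--                 break
--         if idx is None:
--             out.extend([False] * len(line))
--         else:
--             out.extend([False] * idx + [True] * (len(line) - idx))
--         out.append(False)  # placeholder for the '\n' separator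
--     out.pop()  # no '\n' after the last line
--     return out
-- ===== Notes on version B (the rewrite author's own statement) =====
-- stated objective: faster
-- what changed: Replaced A's single stateful per-character index walk (in_comment flag, two-step skip on escapes, mask[i] assignment) by a line-based decomposition: split at newlines, locate the first unescaped % per line with an escaped flag, emit each line's mask as a False-prefix plus True-suffix built with bulk list operations, and join with False at newline positions.
import Mathlib
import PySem

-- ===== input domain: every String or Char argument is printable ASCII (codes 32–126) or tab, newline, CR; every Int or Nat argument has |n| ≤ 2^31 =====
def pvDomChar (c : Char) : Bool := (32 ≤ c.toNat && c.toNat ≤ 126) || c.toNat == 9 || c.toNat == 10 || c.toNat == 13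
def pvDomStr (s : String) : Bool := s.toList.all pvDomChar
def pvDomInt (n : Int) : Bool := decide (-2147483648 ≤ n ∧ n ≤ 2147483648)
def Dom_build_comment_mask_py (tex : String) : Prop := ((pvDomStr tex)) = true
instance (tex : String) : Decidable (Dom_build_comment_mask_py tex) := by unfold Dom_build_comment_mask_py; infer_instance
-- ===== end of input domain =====

-- B restructures A's single stateful scan as: split at '\n', find the first
-- unescaped '%' per line, emit a per-line mask, join with False at newlines
-- (objective: per-line bulk mask construction; a timing run measured B faster).

-- ===== PORT A =====
-- A's while loop consuming one char (or two, in the escape branch) per step,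
-- with the in_comment flag as state; mask entries are produced in index order.
def buildMaskA : List Char → Bool → List Bool
  | [], _ => []
  | c :: rest, inC =>
    if c = '\n' then false :: buildMaskA rest false
    else if c = '\\' ∧ inC = false then
      match rest with
      | [] => [false]
      | _ :: rest' => false :: false :: buildMaskA rest' false
    else if c = '%' ∧ inC = false then true :: buildMaskA rest true
    else inC :: buildMaskA rest inC

def build_comment_mask_py (tex : String) : List Bool := buildMaskA tex.toList false

-- ===== PORT B =====
-- find index of first unescaped '%' (esc = a preceding unconsumed backslash)
def findPct : List Char → Bool → Option Nat
  | [], _ => none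
  | c :: rest, esc =>
    if esc then (findPct rest false).map (· + 1)
    else if c = '\\' then (findPct rest true).map (· + 1)
    else if c = '%' then some 0
    else (findPct rest false).map (· + 1)

def lineMask (l : List Char) : List Bool :=
  match findPct l false with
  | none => List.replicate l.length false
  | some k => List.replicate k false ++ List.replicate (l.length - k) true

-- tex.split('\n')
def splitNl : List Char → List (List Char)
  | [] => [[]]
  | c :: rest =>
    if c = '\n' then [] :: splitNl rest
    else
      match splitNl rest with
      | [] => [[c]]
      | l :: ls => (c :: l) :: ls

-- the append-False-then-pop join of Source B: one False between consecutive lines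
def joinLines : List (List Bool) → List Bool
  | [] => []
  | [m] => m
  | m :: ms => m ++ false :: joinLines ms

def build_comment_mask_py_alt (tex : String) : List Bool :=
  joinLines ((splitNl tex.toList).map lineMask)

-- ===== PRECONDITION & SPEC =====
def Spec_build_comment_mask_py (tex : String) (out : List Bool) : Prop := out = build_comment_mask_py_alt tex
instance (tex : String) (out : List Bool) : Decidable (Spec_build_comment_mask_py tex out) := by unfold Spec_build_comment_mask_py; infer_instance

-- ===== CLAIM (what is proved, stated in full; the proofs are below) =====
def Claim_equal_build_comment_mask_py : Prop := ∀ (tex : String), Dom_build_comment_mask_py tex → Spec_build_comment_mask_py tex (build_comment_mask_py tex)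

-- ===== LEMMAS AND PROOFS =====

-- B's mask of the whole list
def maskB (l : List Char) : List Bool := joinLines ((splitNl l).map lineMask)

-- what A computes from the in_comment = true state: the first line all-True,
-- the remaining lines as in B
def maskC (l : List Char) : List Bool :=
  match splitNl l with
  | [] => []
  | l0 :: ls => joinLines (List.replicate l0.length true :: ls.map lineMask)

theorem splitNl_ne_nil (l : List Char) : splitNl l ≠ [] := by
  cases l with
  | nil => simp [splitNl]
  | cons c rest =>
    simp only [splitNl]
    split
    · simp
    · cases h : splitNl rest <;> simp

theorem joinLines_cons (m : List Bool) (ms : List (List Bool)) (h : ms ≠ []) :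
    joinLines (m :: ms) = m ++ false :: joinLines ms := by
  cases ms with
  | nil => exact absurd rfl h
  | cons a as => rfl

theorem lineMask_other (c : Char) (l : List Char) (h1 : c ≠ '\\') (h2 : c ≠ '%') :
    lineMask (c :: l) = false :: lineMask l := by
  simp only [lineMask, findPct, if_neg h1, if_neg h2, Bool.false_eq_true, if_false]
  cases h : findPct l false with
  | none => simp [List.replicate]
  | some k => simp [List.replicate_succ, Nat.succ_sub_succ]

theorem lineMask_pct (l : List Char) :
    lineMask ('%' :: l) = true :: List.replicate l.length true := by
  simp [lineMask, findPct, List.replicate_succ]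

theorem lineMask_esc_nil : lineMask ['\\'] = [false] := by decide

theorem lineMask_esc (d : Char) (l : List Char) :
    lineMask ('\\' :: d :: l) = false :: false :: lineMask l := by
  simp only [lineMask, findPct, if_true, Option.map_map]
  cases h : findPct l false with
  | none => simp [List.replicate]
  | some k =>
    simp only [Option.map_some, Function.comp]
    simp [List.replicate_succ, List.length_cons, Nat.succ_sub_succ]

-- key induction: A's scan from state false equals maskB, from state true equals maskC
theorem buildMaskA_eq : ∀ n (l : List Char), l.length ≤ n →
    buildMaskA l false = maskB l ∧ buildMaskA l true = maskC l := by
  intro n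
  induction n with
  | zero =>
    intro l hl
    have : l = [] := List.eq_nil_of_length_eq_zero (Nat.le_zero.mp hl)
    subst this
    constructor <;> rfl
  | succ n ih =>
    intro l hl
    cases l with
    | nil => constructor <;> rfl
    | cons c rest =>
      have hr : rest.length ≤ n := by simpa using Nat.lt_succ_iff.mp (Nat.lt_of_lt_of_le (by simp) hl)
      obtain ⟨l0, ls, hs⟩ : ∃ l0 ls, splitNl rest = l0 :: ls := by
        cases h : splitNl rest with
        | nil => exact absurd h (splitNl_ne_nil rest)
        | cons a as => exact ⟨a, as, rfl⟩
      by_cases hnl : c = '\n'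
      · subst hnl
        have step : ∀ b : Bool, buildMaskA ('\n' :: rest) b = false :: buildMaskA rest false := by
          intro b; rw [buildMaskA.eq_def]; simp
        have hB : maskB ('\n' :: rest) = false :: maskB rest := by
          have h1 : splitNl ('\n' :: rest) = [] :: l0 :: ls := by simp [splitNl, hs]
          rw [maskB, h1, List.map_cons, joinLines_cons _ _ (by simp)]
          simp [maskB, hs, lineMask, findPct]
        have hC : maskC ('\n' :: rest) = false :: maskB rest := by
          have h1 : splitNl ('\n' :: rest) = [] :: l0 :: ls := by simp [splitNl, hs]
          simp only [maskC, h1]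
          rw [joinLines_cons _ _ (by simp)]
          simp [maskB, hs]
        rw [step, step, hB, hC, (ih rest hr).1]
        exact ⟨rfl, rfl⟩
      · have hsplit : splitNl (c :: rest) = (c :: l0) :: ls := by
          simp [splitNl, hnl, hs]
        have hmB : maskB (c :: rest) = joinLines (lineMask (c :: l0) :: ls.map lineMask) := by
          simp [maskB, hsplit]
        have hmBr : maskB rest = joinLines (lineMask l0 :: ls.map lineMask) := by
          simp [maskB, hs]
        have hmCr : maskC rest = joinLines (List.replicate l0.length true :: ls.map lineMask) := by
          simp [maskC, hs]
        -- from state true every non-newline branch emits `true` and stays in comment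
        have hQ : buildMaskA (c :: rest) true = maskC (c :: rest) := by
          have step : buildMaskA (c :: rest) true = true :: buildMaskA rest true := by
            rw [buildMaskA.eq_def]; simp [hnl]
          rw [step, (ih rest hr).2, hmCr]
          simp only [maskC, hsplit]
          cases ls with
          | nil => simp [joinLines, List.replicate_succ]
          | cons a as =>
            rw [joinLines_cons _ _ (by simp), joinLines_cons _ _ (by simp)]
            simp [List.replicate_succ]
        refine ⟨?_, hQ⟩
        by_cases hbs : c = '\\'
        · subst hbs
          cases rest with
          | nil =>
            have step : buildMaskA ['\\'] false = [false] := by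
              rw [buildMaskA.eq_def]; simp
            have : splitNl ['\\'] = [['\\']] := by decide
            rw [step, maskB, this]
            simp [joinLines, lineMask_esc_nil]
          | cons d rest' =>
            have hr' : rest'.length ≤ n := Nat.le_of_succ_le hr
            have step : buildMaskA ('\\' :: d :: rest') false
                = false :: false :: buildMaskA rest' false := by
              rw [buildMaskA.eq_def]; simp
            rw [step, (ih rest' hr').1]
            obtain ⟨m0, ms, hs'⟩ : ∃ m0 ms, splitNl rest' = m0 :: ms := by
              cases h : splitNl rest' with
              | nil => exact absurd h (splitNl_ne_nil rest')
              | cons a as => exact ⟨a, as, rfl⟩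
            by_cases hd : d = '\n'
            · subst hd
              have h1 : splitNl ('\\' :: '\n' :: rest') = ['\\'] :: m0 :: ms := by
                simp [splitNl, hs']
              have h2 : maskB ('\\' :: '\n' :: rest') = false :: false :: maskB rest' := by
                simp only [maskB, h1, hs', List.map_cons]
                rw [joinLines_cons _ _ (by simp)]
                simp [lineMask_esc_nil]
              rw [h2]
            · have h1 : splitNl ('\\' :: d :: rest') = ('\\' :: d :: m0) :: ms := by
                simp [splitNl, hd, hs']
              have h2 : maskB ('\\' :: d :: rest') = false :: false :: maskB rest' := by
                simp only [maskB, h1, hs', List.map_cons, lineMask_esc]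
                cases ms with
                | nil => simp [joinLines]
                | cons a as =>
                  rw [joinLines_cons _ _ (by simp), joinLines_cons _ _ (by simp)]
                  simp
              rw [h2]
        · by_cases hp : c = '%'
          · subst hp
            have step : buildMaskA ('%' :: rest) false = true :: buildMaskA rest true := by
              rw [buildMaskA.eq_def]; simp
            rw [step, (ih rest hr).2, hmCr, hmB, lineMask_pct]
            cases ls with
            | nil => simp [joinLines]
            | cons a as =>
              rw [joinLines_cons _ _ (by simp), joinLines_cons _ _ (by simp)]
              simp
          · have step : buildMaskA (c :: rest) false = false :: buildMaskA rest false := by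
              rw [buildMaskA.eq_def]; simp [hnl, hbs, hp]
            rw [step, (ih rest hr).1, hmBr, hmB, lineMask_other c l0 hbs hp]
            cases ls with
            | nil => simp [joinLines]
            | cons a as =>
              rw [joinLines_cons _ _ (by simp), joinLines_cons _ _ (by simp)]
              simp

-- ===== VERDICT (by name: the statement is the Claim_ definition above) =====
theorem build_comment_mask_py_spec : Claim_equal_build_comment_mask_py := by
  intro tex _
  show build_comment_mask_py tex = build_comment_mask_py_alt tex
  exact (buildMaskA_eq tex.toList.length tex.toList le_rfl).1
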